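-- pv_equiv track=rewrite | github.com/AzzyOxx/pec-atividades | sem13-q5-arrays_faturamento_de_empresa_em_array_tridimensional.py | soma_todo_faturamento_filial
-- ===== SOURCE A (Python) =====
-- def soma_todo_faturamento_filial(matriz, filiais): # -->> c) Calcule o total do período para todas as filiais;
--     i_filial = -1
--     i_ano = -1
--     valor_periodo_filial = []
--     for filial in filiais:
--         i_filial += 1
--         soma = 0
--         for ano in matriz:#linha
--             soma += ano[i_filial]
--         valor_periodo_filial.append(soma)
--
--     return valor_periodo_filial
-- ===== SOURCE B (Python) =====
-- def soma_todo_faturamento_filial(matriz, filiais):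
--     total = [0] * len(filiais)
--     for ano in matriz:
--         for j in range(len(filiais)):
--             total[j] += ano[j]
--     return total
-- ===== Notes on version B (the rewrite author's own statement) =====
-- stated objective: alternative
-- what changed: Replaces A's per-branch column scans (recomputing each column total over all rows) with a single row-major pass that accumulates all column totals in one zero-initialized vector updated in place.
import Mathlib
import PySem

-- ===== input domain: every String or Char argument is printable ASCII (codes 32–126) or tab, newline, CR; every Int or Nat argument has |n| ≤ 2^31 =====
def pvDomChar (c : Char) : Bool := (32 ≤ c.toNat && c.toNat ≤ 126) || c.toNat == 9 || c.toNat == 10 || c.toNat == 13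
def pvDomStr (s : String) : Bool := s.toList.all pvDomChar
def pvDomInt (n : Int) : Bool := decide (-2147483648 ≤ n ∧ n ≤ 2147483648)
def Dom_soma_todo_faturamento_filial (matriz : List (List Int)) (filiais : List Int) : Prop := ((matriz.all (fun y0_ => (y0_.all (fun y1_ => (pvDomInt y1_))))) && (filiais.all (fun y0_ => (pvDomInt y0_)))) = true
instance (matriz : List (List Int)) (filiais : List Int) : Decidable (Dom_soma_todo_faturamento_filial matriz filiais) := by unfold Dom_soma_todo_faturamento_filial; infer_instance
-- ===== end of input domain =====

-- B sums all column totals in one row-major pass over matriz into a zero vector, instead of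
-- A's per-branch rescans of the whole matrix (objective: alternative decomposition, same cost).

-- ===== PORT A =====
-- Literal port of A: counter i_filial starting at -1, per-branch inner scan of matriz, append.
-- ano[i_filial] is ported as pyGetD _ _ 0: Python raises IndexError there; Pre_ excludes those inputs.
def soma_todo_faturamento_filial (matriz : List (List Int)) (filiais : List Int) : List Int :=
  (filiais.foldl
    (fun (st : Int × List Int) _filial =>
      let i_filial := st.1 + 1
      let soma := matriz.foldl (fun soma ano => soma + PySem.List.pyGetD ano i_filial 0) 0
      (i_filial, st.2 ++ [soma]))
    (-1, [])).2

-- ===== PORT B =====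
-- Literal port of B: total = [0]*len(filiais); for ano in matriz: for j in range(len(filiais)): total[j] += ano[j]
def soma_todo_faturamento_filial_alt (matriz : List (List Int)) (filiais : List Int) : List Int :=
  matriz.foldl
    (fun total ano =>
      (List.range filiais.length).foldl
        (fun t j => t.set j (t.getD j 0 + PySem.List.pyGetD ano (j : Int) 0)) total)
    (List.replicate filiais.length 0)

-- ===== PRECONDITION & SPEC =====
-- Pre_ excludes exactly the inputs where Python A raises IndexError: some row of matriz is
-- shorter than filiais (the natural B raises the same IndexError there).
def Pre_soma_todo_faturamento_filial (matriz : List (List Int)) (filiais : List Int) : Prop :=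
  ∀ row ∈ matriz, filiais.length ≤ row.length
instance (matriz : List (List Int)) (filiais : List Int) : Decidable (Pre_soma_todo_faturamento_filial matriz filiais) := by unfold Pre_soma_todo_faturamento_filial; infer_instance
def pvWitness_soma_todo_faturamento_filial : List (List Int) × List Int := ([[1, 2], [3, 4]], [10, 20])
def Spec_soma_todo_faturamento_filial (matriz : List (List Int)) (filiais : List Int) (out : List Int) : Prop := out = soma_todo_faturamento_filial_alt matriz filiais
instance (matriz : List (List Int)) (filiais : List Int) (out : List Int) : Decidable (Spec_soma_todo_faturamento_filial matriz filiais out) := by unfold Spec_soma_todo_faturamento_filial; infer_instance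

-- ===== CLAIM (what is proved, stated in full; the proofs are below) =====
def Claim_equal_soma_todo_faturamento_filial : Prop := ∀ (matriz : List (List Int)) (filiais : List Int), Dom_soma_todo_faturamento_filial matriz filiais → Pre_soma_todo_faturamento_filial matriz filiais → Spec_soma_todo_faturamento_filial matriz filiais (soma_todo_faturamento_filial matriz filiais)

-- ===== LEMMAS AND PROOFS =====

/-- Column total of `matriz` at integer index `i` (the inner sum of port A). -/
def pvColSum (matriz : List (List Int)) (i : Int) : Int :=
  matriz.foldl (fun s ano => s + PySem.List.pyGetD ano i 0) 0

theorem pvColSum_cons (ano : List Int) (rest : List (List Int)) (i : Int) :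
    pvColSum (ano :: rest) i = PySem.List.pyGetD ano i 0 + pvColSum rest i := by
  have shift : ∀ (l : List (List Int)) (s : Int),
      l.foldl (fun s ano => s + PySem.List.pyGetD ano i 0) s
        = s + l.foldl (fun s ano => s + PySem.List.pyGetD ano i 0) 0 := by
    intro l
    induction l with
    | nil => intro s; simp
    | cons a l ih =>
        intro s
        simp only [List.foldl_cons]
        rw [ih, ih (0 + PySem.List.pyGetD a i 0)]
        ring
  simp only [pvColSum, List.foldl_cons]
  rw [shift rest]
  ring

theorem pvA_fold (matriz : List (List Int)) (fs : List Int) (k : Int) (acc : List Int) :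
    (fs.foldl
      (fun (st : Int × List Int) _f =>
        let i := st.1 + 1
        let soma := matriz.foldl (fun s ano => s + PySem.List.pyGetD ano i 0) 0
        (i, st.2 ++ [soma])) (k, acc)).2
    = acc ++ (List.range fs.length).map (fun j : Nat => pvColSum matriz (k + 1 + (j : Int))) := by
  induction fs generalizing k acc with
  | nil => simp
  | cons f fs ih =>
      simp only [List.foldl_cons]
      rw [ih]
      simp only [List.length_cons, List.range_succ_eq_map, List.map_cons, List.map_map,
        List.append_assoc, List.singleton_append, Nat.cast_zero]
      congr 2
      · rw [pvColSum]; ring_nf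
      · apply List.map_congr_left
        intro j _
        simp only [Function.comp_apply, Nat.succ_eq_add_one]
        congr 1
        push_cast
        ring

theorem pvA_spec (matriz : List (List Int)) (filiais : List Int) :
    soma_todo_faturamento_filial matriz filiais
      = (List.range filiais.length).map (fun j : Nat => pvColSum matriz (j : Int)) := by
  unfold soma_todo_faturamento_filial
  rw [pvA_fold]
  simp

/-- One inner pass of B rewrites every position `j` with `m ≤ j < m + k` of `t` in place. -/
theorem pvB_inner (f : Nat → Int → Int) :
    ∀ (k m : Nat) (t : List Int), m + k ≤ t.length →
    ((List.range' m k).foldl (fun t j => t.set j (f j (t.getD j 0))) t).length = t.length ∧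
    ∀ j : Nat, ((List.range' m k).foldl (fun t j => t.set j (f j (t.getD j 0))) t).getD j 0
      = if m ≤ j ∧ j < m + k then f j (t.getD j 0) else t.getD j 0 := by
  intro k
  induction k with
  | zero =>
      intro m t _
      simp
  | succ k ih =>
      intro m t hmk
      have hmlt : m < t.length := by omega
      rw [List.range'_succ]
      simp only [List.foldl_cons]
      obtain ⟨hlen, hget⟩ := ih (m + 1) (t.set m (f m (t.getD m 0)))
        (by simpa using by omega)
      refine ⟨by rw [hlen]; simp, ?_⟩
      intro j
      rw [hget j]
      by_cases hm : j = m
      · have hno : ¬ (m + 1 ≤ j ∧ j < m + 1 + k) := by omega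
        have hyes : m ≤ j ∧ j < m + (k + 1) := by omega
        rw [if_neg hno, if_pos hyes, hm]
        simp [List.getD, List.getElem?_set_self hmlt]
      · have hset : (t.set m (f m (t.getD m 0))).getD j 0 = t.getD j 0 := by
          simp [List.getD, List.getElem?_set_ne (fun h => hm h.symm)]
        rw [hset]
        by_cases h1 : m + 1 ≤ j ∧ j < m + 1 + k
        · rw [if_pos h1, if_pos (by omega)]
        · rw [if_neg h1, if_neg (by omega)]

theorem pvB_outer (n : Nat) :
    ∀ (matriz : List (List Int)) (t : List Int), t.length = n →
    ((matriz.foldl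
      (fun total ano =>
        (List.range n).foldl
          (fun t j => t.set j (t.getD j 0 + PySem.List.pyGetD ano (j : Int) 0)) total) t).length = n) ∧
    ∀ j < n, (matriz.foldl
      (fun total ano =>
        (List.range n).foldl
          (fun t j => t.set j (t.getD j 0 + PySem.List.pyGetD ano (j : Int) 0)) total) t).getD j 0
      = t.getD j 0 + pvColSum matriz (j : Int) := by
  intro matriz
  induction matriz with
  | nil =>
      intro t ht
      refine ⟨ht, ?_⟩
      intro j _
      simp [pvColSum]
  | cons ano rest ih =>
      intro t ht
      simp only [List.foldl_cons, List.range_eq_range'] at ih ⊢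
      obtain ⟨h1, h2⟩ := pvB_inner (fun j x => x + PySem.List.pyGetD ano (j : Int) 0) n 0 t
        (by omega)
      obtain ⟨hl, hg⟩ := ih _ (by rw [h1, ht])
      refine ⟨hl, ?_⟩
      intro j hj
      rw [hg j hj, h2 j, if_pos (by omega), pvColSum_cons]
      ring

theorem pvB_spec (matriz : List (List Int)) (filiais : List Int) :
    soma_todo_faturamento_filial_alt matriz filiais
      = (List.range filiais.length).map (fun j : Nat => pvColSum matriz (j : Int)) := by
  unfold soma_todo_faturamento_filial_alt
  obtain ⟨hl, hg⟩ := pvB_outer filiais.length matriz (List.replicate filiais.length 0) (by simp)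
  apply List.ext_getElem
  · rw [List.length_map, List.length_range, hl]
  · intro i h1 h2
    have hi : i < filiais.length := by rw [← hl]; exact h1
    have hv := hg i hi
    rw [List.getD_eq_getElem _ 0 h1] at hv
    rw [hv]
    have hrep : (List.replicate filiais.length (0 : Int)).getD i 0 = 0 := by
      simp [List.getD, hi]
    rw [hrep, zero_add]
    rw [List.getElem_map]
    simp [List.getElem_range]

-- ===== VERDICT (by name: the statement is the Claim_ definition above) =====
theorem soma_todo_faturamento_filial_spec : Claim_equal_soma_todo_faturamento_filial := by
  intro matriz filiais _ _
  unfold Spec_soma_todo_faturamento_filial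
  rw [pvA_spec, pvB_spec]
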